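-- pv_equiv track=rewrite | github.com/yatshunlee/UNSW-COMP9021 | exam2/q3.py | good_subsequences
-- ===== SOURCE A (Python) =====
-- def good_subsequences(word):
--     '''
--     >>> good_subsequences('')
--     ['']
--     >>> good_subsequences('aaa')
--     ['', 'a']
--     >>> good_subsequences('aaabbb')
--     ['', 'a', 'ab', 'b']
--     >>> good_subsequences('aaabbc')
--     ['', 'a', 'ab', 'abc', 'ac', 'b', 'bc', 'c']
--     >>> good_subsequences('aaabbaaa')
--     ['', 'a', 'ab', 'b', 'ba']
--     >>> good_subsequences('abbbcaaabccc')
--     ['', 'a', 'ab', 'abc', 'ac', 'acb', 'b', 'ba', 'bac',\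
--  'bc', 'bca', 'c', 'ca', 'cab', 'cb']
--     >>> good_subsequences('abbbcaaabcccaaa')
--     ['', 'a', 'ab', 'abc', 'ac', 'acb', 'b', 'ba', 'bac',\
--  'bc', 'bca', 'c', 'ca', 'cab', 'cb', 'cba']
--     >>> good_subsequences('abbbcaaabcccaaabbbbbccab')
--     ['', 'a', 'ab', 'abc', 'ac', 'acb', 'b', 'ba', 'bac',\
--  'bc', 'bca', 'c', 'ca', 'cab', 'cb', 'cba']
--     >>> good_subsequences('abcb')
--     ['', 'a', 'ab', 'abc', 'ac', 'acb', 'b', 'bc', 'c', 'cb']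
--     '''
--     # Insert your code here
--     o = ''
--     if len(word) > 0:
--         o = word[0]
--         for i in range(1, len(word)):
--             if o[-1] != word[i]:
--               o += word[i]
--
--     output = []
--     end_count = len(set(o))
--     def dfs(options, path):
--         if path not in output:
--             output.append(path[:])
--             if len(path) == end_count:
--                 return
--             for i in range(len(options)):
--                 if options[i] not in path:
--                     new = options[i+1:]
--                     path += options[i]
--                     dfs(new, path)
--                     path = path[:-1]
--
--     dfs(o, '')
--     return sorted(output)
-- ===== SOURCE B (Python) =====
-- def good_subsequences(word):
--     o = word[:1] + ''.join(y for x, y in zip(word, word[1:]) if x != y)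
--     subs = {''}
--     for c in o:
--         subs |= {s + c for s in subs if c not in s}
--     return sorted(subs)
-- ===== Notes on version B (the rewrite author's own statement) =====
-- stated objective: faster
-- what changed: Replaces the pruned DFS with list-scan deduplication by a single left-to-right pass that maintains a set of all distinct-character subsequences seen so far, extending each by the next deduplicated character.
import Mathlib
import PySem

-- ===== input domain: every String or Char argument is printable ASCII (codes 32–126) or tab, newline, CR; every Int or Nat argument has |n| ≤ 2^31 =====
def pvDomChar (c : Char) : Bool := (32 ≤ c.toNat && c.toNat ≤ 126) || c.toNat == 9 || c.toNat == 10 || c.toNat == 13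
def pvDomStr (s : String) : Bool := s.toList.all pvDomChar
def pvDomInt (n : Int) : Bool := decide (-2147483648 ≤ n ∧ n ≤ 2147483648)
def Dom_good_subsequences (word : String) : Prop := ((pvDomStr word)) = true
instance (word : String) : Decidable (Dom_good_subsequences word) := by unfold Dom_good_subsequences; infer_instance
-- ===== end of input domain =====

-- B replaces A's pruned DFS (with list-scan dedup of the output) by one left-to-right pass
-- maintaining the set of all distinct-character subsequences seen so far: measured faster (asymptotic).


-- ===== PORT A =====
-- the nested 'def dfs(options, path)' of A; output threaded explicitly, loop body as goA
mutual
def dfsA (endc : Nat) (options : List Char) (path : List Char) (output : List (List Char)) :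
    List (List Char) :=
  if path ∈ output then output
  else
    let output' := output ++ [path]
    if path.length = endc then output'
    else goA endc options path output'
  termination_by (options.length, 1)

def goA (endc : Nat) (l : List Char) (path : List Char) (output : List (List Char)) :
    List (List Char) :=
  match l with
  | [] => output
  | c :: rest =>
      let output' := if c ∈ path then output else dfsA endc rest (path ++ [c]) output
      goA endc rest path output'
  termination_by (l.length, 0)
end

def good_subsequences (word : String) : List String :=
  let w := word.toList
  -- o = '' ; if len(word) > 0: o = word[0]; for i in range(1, len(word)): if o[-1] != word[i]: o += word[i]
  let o : List Char :=
    if w.length > 0 then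
      (PySem.List.pyRange 1 (w.length : Int) 1).foldl
        (fun o i =>
          if PySem.List.pyGetD o (-1) ' ' ≠ PySem.List.pyGetD w i ' '
          then o ++ [PySem.List.pyGetD w i ' '] else o)
        [PySem.List.pyGetD w 0 ' ']
    else []
  let endc := (PySem.Set.ofList o).length       -- end_count = len(set(o))
  let output := dfsA endc o [] []               -- dfs(o, '')
  PySem.List.sorted (output.map (fun p => String.ofList p)) (fun x => x) false

-- ===== PORT B =====
def good_subsequences_alt (word : String) : List String :=
  let w := word.toList
  -- o = word[:1] + ''.join(y for x, y in zip(word, word[1:]) if x != y)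
  let o : List Char :=
    PySem.List.slice w none (some 1) ++
      ((w.zip (PySem.List.slice w (some 1) none)).filter (fun p => p.1 ≠ p.2)).map (fun p => p.2)
  -- subs = {''} ; for c in o: subs |= {s + c for s in subs if c not in s}
  let subs : PySem.Set (List Char) :=
    o.foldl
      (fun subs c =>
        PySem.Set.union subs
          (PySem.Set.ofList ((subs.filter (fun s => decide (c ∉ s))).map (fun s => s ++ [c]))))
      (PySem.Set.ofList [[]])
  PySem.List.sorted (subs.map (fun p => String.ofList p)) (fun x => x) false

-- ===== PRECONDITION & SPEC =====
def Spec_good_subsequences (word : String) (out : List String) : Prop := out = good_subsequences_alt word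
instance (word : String) (out : List String) : Decidable (Spec_good_subsequences word out) := by unfold Spec_good_subsequences; infer_instance

-- ===== CLAIM (what is proved, stated in full; the proofs are below) =====
def Claim_equal_good_subsequences : Prop := ∀ (word : String), Dom_good_subsequences word → Spec_good_subsequences word (good_subsequences word)

-- ===== LEMMAS AND PROOFS =====

-- canonical consecutive dedup (proof helper; equals both ports' computations of `o`)
def cded (c : Char) : List Char → List Char
  | [] => [c]
  | b :: t => if c ≠ b then c :: cded b t else cded c t

lemma nodup_pct {path t : List Char} {c : Char} (h : (path ++ c :: t).Nodup) : c ∉ path := by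
  intro hc
  exact (List.disjoint_of_nodup_append h) hc (List.mem_cons_self ..)

-- A's dedup loop, from any nonempty accumulator, is `cded` of the last element
lemma foldlA_eq_cded :
    ∀ (l acc : List Char) (h : acc ≠ []),
      l.foldl (fun o c => if PySem.List.pyGetD o (-1) ' ' ≠ c then o ++ [c] else o) acc
        = acc.dropLast ++ cded (acc.getLast h) l := by
  intro l
  induction l with
  | nil =>
      intro acc h
      simp only [List.foldl_nil, cded]
      exact (List.dropLast_append_getLast h).symm
  | cons b t ih =>
      intro acc h
      simp only [List.foldl_cons]
      rw [PySem.List.pyGetD_neg_one acc ' ' h]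
      by_cases hne : acc.getLast h ≠ b
      · rw [if_pos hne, ih (acc ++ [b]) (by simp)]
        have h1 : (acc ++ [b]).dropLast = acc := by
          simp
        have h2 : (acc ++ [b]).getLast (by simp) = b := by
          simp
        rw [h1, h2, cded, if_pos hne]
        have h3 : acc.dropLast ++ acc.getLast h :: cded b t
            = (acc.dropLast ++ [acc.getLast h]) ++ cded b t := by simp
        rw [h3, List.dropLast_append_getLast h]
      · rw [if_neg hne, ih acc h]
        push Not at hne
        rw [cded, if_neg (by simp [hne])]

-- B's zip/filter comprehension is `cded`
lemma zipfilter_eq_cded :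
    ∀ (rest : List Char) (x : Char),
      x :: (((x :: rest).zip rest).filter (fun p => decide (p.1 ≠ p.2))).map (fun p => p.2)
        = cded x rest := by
  intro rest
  induction rest with
  | nil => intro x; simp [cded]
  | cons b t ih =>
      intro x
      by_cases hxb : x ≠ b
      · simp only [List.zip_cons_cons, List.filter_cons, cded, if_pos hxb]
        simp only [decide_eq_true_eq]
        rw [if_pos hxb]
        simp only [List.map_cons]
        rw [← ih b]
      · push Not at hxb
        subst hxb
        simp only [List.zip_cons_cons, List.filter_cons, cded]
        simp only [decide_eq_true_eq]
        rw [if_neg (by simp), if_neg (by simp)]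
        rw [← ih x]

-- a Nodup word of full distinct-letter length contains every letter of o
lemma sat_all_mem (o path : List Char) (hnd : path.Nodup) (hsub : path.Sublist o)
    (hlen : path.length = (PySem.Set.ofList o).length) {c : Char} (hc : c ∈ o) : c ∈ path := by
  have h1 : path.Subperm (PySem.Set.ofList o) :=
    hnd.subperm (fun x hx => (PySem.Set.mem_ofList o x).2 (hsub.subset hx))
  have h2 : path.Perm (PySem.Set.ofList o) := h1.perm_of_length_le (le_of_eq hlen.symm)
  exact h2.mem_iff.2 ((PySem.Set.mem_ofList o c).2 hc)

-- evaluation helpers for the well-founded mutual definitions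
lemma dfsA_fresh_eval (endc : Nat) (options path : List Char) (output : List (List Char))
    (hpo : path ∉ output) :
    dfsA endc options path output =
      if path.length = endc then output ++ [path]
      else goA endc options path (output ++ [path]) := by
  rw [dfsA]
  simp only [if_neg hpo]

lemma goA_nil (endc : Nat) (path : List Char) (output : List (List Char)) :
    goA endc [] path output = output := by
  rw [goA]

lemma goA_cons (endc : Nat) (c : Char) (rest path : List Char) (output : List (List Char)) :
    goA endc (c :: rest) path output =
      goA endc rest path
        (if c ∈ path then output else dfsA endc rest (path ++ [c]) output) := by
  rw [goA]

lemma nodup_snoc {output : List (List Char)} {p : List Char}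
    (hN : output.Nodup) (hp : p ∉ output) : (output ++ [p]).Nodup := by
  rw [List.nodup_append]
  exact ⟨hN, List.nodup_singleton p, fun a ha b hb => by
    rw [List.mem_singleton] at hb; subst hb; exact fun h => hp (h ▸ ha)⟩

-- statement of the dfs invariant: from a fresh path, dfs adds exactly the
-- Nodup extensions of path by sublists of options
def DfsP (o : List Char) (n : Nat) : Prop :=
  ∀ (options path : List Char) (output : List (List Char)),
    options.length ≤ n →
    (∀ q, path ++ q ∉ output) →
    path.Nodup →
    (∀ q, q.Sublist options → (path ++ q).Sublist o) →
    ((∀ q, q ∈ dfsA (PySem.Set.ofList o).length options path output ↔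
        q ∈ output ∨ ∃ t, t.Sublist options ∧ (path ++ t).Nodup ∧ q = path ++ t)
      ∧ (output.Nodup → (dfsA (PySem.Set.ofList o).length options path output).Nodup))

-- statement of the loop invariant: each remaining character is either fresh
-- (no extension recorded yet) or saturated (all its extensions recorded)
def GoP (o : List Char) (n : Nat) : Prop :=
  ∀ (l path : List Char) (output : List (List Char)),
    l.length ≤ n →
    path.Nodup →
    (∀ q, q.Sublist l → (path ++ q).Sublist o) →
    (∀ c, c ∈ l → c ∉ path →
      (∀ q, path ++ c :: q ∉ output) ∨
      (∀ t, t.Sublist l → (path ++ c :: t).Nodup → path ++ c :: t ∈ output)) →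
    ((∀ q, q ∈ goA (PySem.Set.ofList o).length l path output ↔
        q ∈ output ∨ ∃ c t, (c :: t).Sublist l ∧ (path ++ c :: t).Nodup ∧ q = path ++ c :: t)
      ∧ (output.Nodup → (goA (PySem.Set.ofList o).length l path output).Nodup))

-- the dfs body from a fresh path, via the loop invariant
lemma dfsP_of_goP (o : List Char) (n : Nat) (hgo : GoP o n) : DfsP o n := by
  intro options path output hlen h1 h2 h3
  have hpo : path ∉ output := by simpa using h1 []
  have hiff0 : ∀ q : List Char, q ∈ output ++ [path] ↔
      q ∈ output ∨ q = path := by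
    intro q
    simp [List.mem_append]
  rw [dfsA_fresh_eval _ _ _ _ hpo]
  by_cases hec : path.length = (PySem.Set.ofList o).length
  · rw [if_pos hec]
    constructor
    · intro q
      rw [hiff0 q]
      constructor
      · rintro (h | rfl)
        · exact Or.inl h
        · exact Or.inr ⟨[], List.nil_sublist _, by simpa using h2, by simp⟩
      · rintro (h | ⟨t, ht, hN, rfl⟩)
        · exact Or.inl h
        · rcases t with _ | ⟨c, t'⟩
          · exact Or.inr (by simp)
          · exfalso
            have hco : c ∈ o := (h3 _ ht).subset (by simp)
            have hpath : path.Sublist o := by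
              simpa using h3 [] (List.nil_sublist _)
            have hcp : c ∈ path := sat_all_mem o path h2 hpath hec hco
            exact nodup_pct hN hcp
    · intro hN; exact nodup_snoc hN hpo
  · rw [if_neg hec]
    have hk3 : ∀ c, c ∈ options → c ∉ path →
        (∀ q, path ++ c :: q ∉ output ++ [path]) ∨
        (∀ t, t.Sublist options → (path ++ c :: t).Nodup → path ++ c :: t ∈ output ++ [path]) := by
      intro c hc hcp
      left
      intro q hq
      rw [List.mem_append, List.mem_singleton] at hq
      rcases hq with hq | hq
      · exact h1 (c :: q) hq
      · have := congrArg List.length hq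
        simp at this
    obtain ⟨Q, QN⟩ := hgo options path (output ++ [path]) hlen h2 h3 hk3
    constructor
    · intro q
      rw [Q q]
      simp only [hiff0 q]
      constructor
      · rintro ((h | rfl) | ⟨c, t, ht, hN, rfl⟩)
        · exact Or.inl h
        · exact Or.inr ⟨[], List.nil_sublist _, by simpa using h2, by simp⟩
        · exact Or.inr ⟨c :: t, ht, hN, rfl⟩
      · rintro (h | ⟨t, ht, hN, rfl⟩)
        · exact Or.inl (Or.inl h)
        · rcases t with _ | ⟨c, t'⟩
          · exact Or.inl (Or.inr (by simp))
          · exact Or.inr ⟨c, t', ht, hN, rfl⟩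
    · intro hN; exact QN (nodup_snoc hN hpo)

theorem dfsA_goA_spec (o : List Char) : ∀ n : Nat, DfsP o n ∧ GoP o n := by
  intro n
  induction n with
  | zero =>
      have hgo : GoP o 0 := by
        intro l path output hlen _ _ _
        have hl : l = [] := List.eq_nil_of_length_eq_zero (Nat.le_zero.1 hlen)
        subst hl
        rw [goA_nil]
        refine ⟨fun q => ?_, fun hN => hN⟩
        constructor
        · exact Or.inl
        · rintro (h | ⟨c, t, ht, _, _⟩)
          · exact h
          · exact absurd (List.sublist_nil.1 ht) (by simp)
      exact ⟨dfsP_of_goP o 0 hgo, hgo⟩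
  | succ n ih =>
      have hgo : GoP o (n + 1) := by
        intro l path output hlen hnd hsubl hk3
        rcases l with _ | ⟨c, rest⟩
        · rw [goA_nil]
          refine ⟨fun q => ?_, fun hN => hN⟩
          constructor
          · exact Or.inl
          · rintro (h | ⟨c, t, ht, _, _⟩)
            · exact h
            · exact absurd (List.sublist_nil.1 ht) (by simp)
        · rw [goA_cons]
          have hrestlen : rest.length ≤ n := by
            simp only [List.length_cons] at hlen
            omega
          have hsubrest : ∀ q, q.Sublist rest → (path ++ q).Sublist o :=
            fun q hq => hsubl q (hq.cons c)
          by_cases hc : c ∈ path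
          · rw [if_pos hc]
            have hk3' : ∀ c', c' ∈ rest → c' ∉ path →
                (∀ q, path ++ c' :: q ∉ output) ∨
                (∀ t, t.Sublist rest → (path ++ c' :: t).Nodup → path ++ c' :: t ∈ output) := by
              intro c' hc' hcp'
              rcases hk3 c' (List.mem_cons_of_mem c hc') hcp' with h | h
              · exact Or.inl h
              · exact Or.inr (fun t ht hN => h t (ht.cons c) hN)
            obtain ⟨Q, QN⟩ := ih.2 rest path output hrestlen hnd hsubrest hk3'
            refine ⟨fun q => ?_, QN⟩
            rw [Q q]
            constructor
            · rintro (h | ⟨c', t, ht, hN, rfl⟩)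
              · exact Or.inl h
              · exact Or.inr ⟨c', t, ht.cons c, hN, rfl⟩
            · rintro (h | ⟨c', t, ht, hN, rfl⟩)
              · exact Or.inl h
              · rcases List.sublist_cons_iff.1 ht with ht' | ⟨r, hr, hr'⟩
                · exact Or.inr ⟨c', t, ht', hN, rfl⟩
                · exfalso
                  have hcc : c' = c := (List.cons_eq_cons.1 hr).1
                  subst hcc
                  exact nodup_pct hN hc
          · rw [if_neg hc]
            have hndc : (path ++ [c]).Nodup := by
              rw [← List.concat_eq_append, List.nodup_concat]
              exact ⟨hc, hnd⟩
            have hstar : (∀ q, q ∈ dfsA (PySem.Set.ofList o).length rest (path ++ [c]) output ↔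
                  q ∈ output ∨ ∃ t, t.Sublist rest ∧ (path ++ c :: t).Nodup ∧ q = path ++ c :: t)
                ∧ (output.Nodup →
                    (dfsA (PySem.Set.ofList o).length rest (path ++ [c]) output).Nodup) := by
              rcases hk3 c (List.mem_cons_self ..) hc with hfresh | hsat
              · have h1' : ∀ q, (path ++ [c]) ++ q ∉ output := by
                  intro q
                  simpa [List.append_assoc] using hfresh q
                have h3' : ∀ q, q.Sublist rest → ((path ++ [c]) ++ q).Sublist o := by
                  intro q hq
                  simpa [List.append_assoc] using hsubl (c :: q) (List.cons_sublist_cons.2 hq)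
                obtain ⟨P, PN⟩ := ih.1 rest (path ++ [c]) output hrestlen h1' hndc h3'
                refine ⟨fun q => ?_, PN⟩
                rw [P q]
                simp only [List.append_assoc, List.singleton_append]
              · have hmem : path ++ [c] ∈ output := by
                  have := hsat [] (List.nil_sublist _) (by simpa using hndc)
                  simpa using this
                have heq : dfsA (PySem.Set.ofList o).length rest (path ++ [c]) output = output := by
                  rw [dfsA, if_pos hmem]
                rw [heq]
                refine ⟨fun q => ?_, fun hN => hN⟩
                constructor
                · exact Or.inl
                · rintro (h | ⟨t, ht, hN, rfl⟩)
                  · exact h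
                  · exact hsat t (ht.cons c) hN
            obtain ⟨hS, hSN⟩ := hstar
            have hk3' : ∀ c', c' ∈ rest → c' ∉ path →
                (∀ q, path ++ c' :: q ∉ dfsA (PySem.Set.ofList o).length rest (path ++ [c]) output) ∨
                (∀ t, t.Sublist rest → (path ++ c' :: t).Nodup →
                  path ++ c' :: t ∈ dfsA (PySem.Set.ofList o).length rest (path ++ [c]) output) := by
              intro c' hc' hcp'
              rcases hk3 c' (List.mem_cons_of_mem c hc') hcp' with hf | hs
              · by_cases hcc : c' = c
                · subst hcc
                  exact Or.inr (fun t ht hN => (hS _).2 (Or.inr ⟨t, ht, hN, rfl⟩))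
                · left
                  intro q hq
                  rcases (hS _).1 hq with h | ⟨t, _, _, he⟩
                  · exact hf q h
                  · exact hcc (List.cons_eq_cons.1 (List.append_cancel_left he)).1
              · exact Or.inr (fun t ht hN => (hS _).2 (Or.inl (hs t (ht.cons c) hN)))
            obtain ⟨Q, QN⟩ := ih.2 rest path
              (dfsA (PySem.Set.ofList o).length rest (path ++ [c]) output)
              hrestlen hnd hsubrest hk3'
            refine ⟨fun q => ?_, fun hN => QN (hSN hN)⟩
            rw [Q q]
            constructor
            · rintro (h | ⟨c', t, ht, hN, rfl⟩)
              · rcases (hS _).1 h with h' | ⟨t, ht, hN, rfl⟩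
                · exact Or.inl h'
                · exact Or.inr ⟨c, t, List.cons_sublist_cons.2 ht, hN, rfl⟩
              · exact Or.inr ⟨c', t, ht.cons c, hN, rfl⟩
            · rintro (h | ⟨c', t, ht, hN, rfl⟩)
              · exact Or.inl ((hS _).2 (Or.inl h))
              · rcases List.sublist_cons_iff.1 ht with ht' | ⟨r, hr, hr'⟩
                · exact Or.inr ⟨c', t, ht', hN, rfl⟩
                · have hcc : c' = c := (List.cons_eq_cons.1 hr).1
                  have htr : t = r := (List.cons_eq_cons.1 hr).2
                  subst hcc; subst htr
                  exact Or.inl ((hS _).2 (Or.inr ⟨t, hr', hN, rfl⟩))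
      exact ⟨dfsP_of_goP o (n + 1) hgo, hgo⟩



-- B's fold: its members are exactly the elements of acc extended by Nodup-fresh sublists of l
lemma B_mem :
    ∀ (l : List Char) (acc : List (List Char)) (q : List Char),
      q ∈ l.foldl (fun subs c => PySem.Set.union subs
          (PySem.Set.ofList ((subs.filter (fun s => decide (c ∉ s))).map (fun s => s ++ [c])))) acc ↔
        ∃ s t, s ∈ acc ∧ t.Sublist l ∧ t.Nodup ∧ (∀ x ∈ t, x ∉ s) ∧ q = s ++ t := by
  intro l
  induction l with
  | nil =>
      intro acc q
      simp only [List.foldl_nil]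
      constructor
      · intro hq
        exact ⟨q, [], hq, List.nil_sublist _, List.nodup_nil, by simp, by simp⟩
      · rintro ⟨s, t, hs, ht, _, _, rfl⟩
        have : t = [] := List.sublist_nil.1 ht
        subst this
        simpa using hs
  | cons c rest ih =>
      intro acc q
      rw [List.foldl_cons, ih]
      constructor
      · rintro ⟨s, t, hs, ht, hndt, hdis, rfl⟩
        rw [PySem.Set.mem_union] at hs
        rcases hs with hs | hs
        · exact ⟨s, t, hs, ht.cons c, hndt, hdis, rfl⟩
        · rw [PySem.Set.mem_ofList, List.mem_map] at hs
          obtain ⟨s', hs', rfl⟩ := hs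
          rw [List.mem_filter] at hs'
          obtain ⟨hs'acc, hcs'⟩ := hs'
          have hcs' : c ∉ s' := by simpa using hcs'
          refine ⟨s', c :: t, hs'acc, List.cons_sublist_cons.2 ht, ?_, ?_, by simp⟩
          · rw [List.nodup_cons]
            exact ⟨fun hct => (hdis c hct) (by simp), hndt⟩
          · intro x hx
            rcases List.mem_cons.1 hx with rfl | hx'
            · exact hcs'
            · intro hxs'
              exact hdis x hx' (by simp [hxs'])
      · rintro ⟨s, t, hs, ht, hndt, hdis, rfl⟩
        rcases List.sublist_cons_iff.1 ht with ht' | ⟨r, rfl, hr⟩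
        · exact ⟨s, t, (PySem.Set.mem_union _ _ _).2 (Or.inl hs), ht', hndt, hdis, rfl⟩
        · refine ⟨s ++ [c], r, ?_, hr, (List.nodup_cons.1 hndt).2, ?_, by simp⟩
          · rw [PySem.Set.mem_union]
            right
            rw [PySem.Set.mem_ofList, List.mem_map]
            exact ⟨s, List.mem_filter.2 ⟨hs, by simpa using hdis c (by simp)⟩, rfl⟩
          · intro x hx hmem
            rcases List.mem_append.1 hmem with h | h
            · exact hdis x (List.mem_cons_of_mem c hx) h
            · rw [List.mem_singleton] at h
              subst h
              exact (List.nodup_cons.1 hndt).1 hx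

lemma B_nodup :
    ∀ (l : List Char) (acc : List (List Char)), acc.Nodup →
      (l.foldl (fun subs c => PySem.Set.union subs
          (PySem.Set.ofList ((subs.filter (fun s => decide (c ∉ s))).map (fun s => s ++ [c])))) acc).Nodup := by
  intro l
  induction l with
  | nil => intro acc hacc; simpa using hacc
  | cons c rest ih =>
      intro acc hacc
      rw [List.foldl_cons]
      exact ih _ (PySem.Set.nodup_union _ _ hacc)

-- the two ports' computations of the deduplicated word `o`
def oAx (w : List Char) : List Char :=
  if w.length > 0 then
    (PySem.List.pyRange 1 (w.length : Int) 1).foldl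
      (fun o i =>
        if PySem.List.pyGetD o (-1) ' ' ≠ PySem.List.pyGetD w i ' '
        then o ++ [PySem.List.pyGetD w i ' '] else o)
      [PySem.List.pyGetD w 0 ' ']
  else []

def oBx (w : List Char) : List Char :=
  PySem.List.slice w none (some 1) ++
    ((w.zip (PySem.List.slice w (some 1) none)).filter (fun p => decide (p.1 ≠ p.2))).map (fun p => p.2)

def subsBx (o : List Char) : List (List Char) :=
  o.foldl
    (fun subs c =>
      PySem.Set.union subs
        (PySem.Set.ofList ((subs.filter (fun s => decide (c ∉ s))).map (fun s => s ++ [c]))))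
    (PySem.Set.ofList [[]])

lemma oAx_eq_oBx (w : List Char) : oAx w = oBx w := by
  rcases w with _ | ⟨x, rest⟩
  · unfold oAx oBx
    rw [PySem.List.slice_to _ (by norm_num : (0:Int) ≤ 1), PySem.List.slice_from_one]
    simp
  · unfold oAx oBx
    rw [if_pos (by simp)]
    rw [PySem.List.foldl_pyRange_pyGetD' (x :: rest) ' '
      (fun o c => if PySem.List.pyGetD o (-1) ' ' ≠ c then o ++ [c] else o)
      [PySem.List.pyGetD (x :: rest) 0 ' '] (by norm_num : (0:Int) ≤ 1)]
    have hx0 : PySem.List.pyGetD (x :: rest) 0 ' ' = x := by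
      rw [PySem.List.pyGetD_zero]; rfl
    rw [hx0]
    have hdrop : List.drop (1:Int).toNat (x :: rest) = rest := by simp
    rw [hdrop, foldlA_eq_cded rest [x] (by simp)]
    rw [PySem.List.slice_to _ (by norm_num : (0:Int) ≤ 1), PySem.List.slice_from_one]
    have htake : List.take (1:Int).toNat (x :: rest) = [x] := by simp
    rw [htake]
    show [x].dropLast ++ cded ([x].getLast (by simp)) rest = _
    rw [show [x].dropLast = ([] : List Char) from rfl, show [x].getLast (by simp) = x from rfl]
    rw [List.nil_append, ← zipfilter_eq_cded rest x]
    rfl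

lemma main_eq (w : List Char) :
    PySem.List.sorted
        ((dfsA (PySem.Set.ofList (oAx w)).length (oAx w) [] []).map (fun p => String.ofList p))
        (fun x => x) false
      = PySem.List.sorted ((subsBx (oBx w)).map (fun p => String.ofList p)) (fun x => x) false := by
  rw [oAx_eq_oBx]
  obtain ⟨P, PN⟩ := (dfsA_goA_spec (oBx w) (oBx w).length).1 (oBx w) [] []
    (le_refl _) (by simp) List.nodup_nil (fun q hq => by simpa using hq)
  have hAmem : ∀ q, q ∈ dfsA (PySem.Set.ofList (oBx w)).length (oBx w) [] [] ↔
      q.Sublist (oBx w) ∧ q.Nodup := by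
    intro q
    rw [P q]
    constructor
    · rintro (h | ⟨t, ht, hN, rfl⟩)
      · simp at h
      · exact ⟨by simpa using ht, by simpa using hN⟩
    · rintro ⟨h1, h2⟩
      exact Or.inr ⟨q, h1, by simpa using h2, by simp⟩
  have hAnd : (dfsA (PySem.Set.ofList (oBx w)).length (oBx w) [] []).Nodup := PN List.nodup_nil
  have hBmem : ∀ q, q ∈ subsBx (oBx w) ↔ q.Sublist (oBx w) ∧ q.Nodup := by
    intro q
    unfold subsBx
    rw [B_mem]
    constructor
    · rintro ⟨s, t, hs, ht, hndt, _, rfl⟩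
      rw [PySem.Set.mem_ofList] at hs
      have hs' : s = [] := by simpa using hs
      subst hs'
      exact ⟨by simpa using ht, by simpa using hndt⟩
    · rintro ⟨h1, h2⟩
      exact ⟨[], q, (PySem.Set.mem_ofList _ _).2 (by simp), h1, h2, by simp, by simp⟩
  have hBnd : (subsBx (oBx w)).Nodup := B_nodup _ _ (PySem.Set.nodup_ofList _)
  have hperm : (dfsA (PySem.Set.ofList (oBx w)).length (oBx w) [] []).Perm (subsBx (oBx w)) :=
    (List.perm_ext_iff_of_nodup hAnd hBnd).2 (fun q => by rw [hAmem q, hBmem q])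
  exact PySem.List.sorted_eq_sorted_of_perm _ _ _
    (fun a b h => h) (hperm.map (fun p => String.ofList p))

-- ===== VERDICT (by name: the statement is the Claim_ definition above) =====
theorem good_subsequences_spec : Claim_equal_good_subsequences := by
  intro word _
  show good_subsequences word = good_subsequences_alt word
  have hA : good_subsequences word =
      PySem.List.sorted
        ((dfsA (PySem.Set.ofList (oAx word.toList)).length (oAx word.toList) [] []).map
          (fun p => String.ofList p)) (fun x => x) false := rfl
  have hB : good_subsequences_alt word =
      PySem.List.sorted ((subsBx (oBx word.toList)).map (fun p => String.ofList p))
        (fun x => x) false := rfl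
  rw [hA, hB]
  exact main_eq word.toList
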